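-- pv_equiv track=rewrite | github.com/alexandraback/datacollection | solutions_1595491_0/Python/LouisP/template.py | get_nb_better_result
-- ===== SOURCE A (Python) =====
-- def get_best_score(score, surprising=False):
--     '''Return the best possible score
--     >>> get_best_score(23, False)
--     8
--     >>> get_best_score(22, False)
--     8
--     >>> get_best_score(21, False)
--     7
--     >>> get_best_score(0, False)
--     0
--     >>> get_best_score(0, True)
--     0
--     >>> get_best_score(1, False)
--     1
--     >>> get_best_score(1, True)
--     1
--     >>> get_best_score(2, False)
--     1
--     >>> get_best_score(2, True)
--     2
--     >>> get_best_score(3, False)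
--     1
--     >>> get_best_score(3, True)
--     2
--     '''
--     if score == 0:
--         return 0
--     if score == 1:
--         return 1
--     if surprising:
--         offset = 2
--     else:
--         offset = 0
--     for i in range(3):
--         if (score + offset + i) > 30:
--             return -1
--         if (score + offset + i) % 3 == 0:
--             return (score + offset + i) // 3
--     else:
--         return -1
--
-- def get_nb_better_result(S, p, scores):
--     '''Return the nb of people that could have had a better score than p
--     >>> get_nb_better_result(1, 5, [15, 13, 11])
--     3
--     >>> get_nb_better_result(0, 8, [23, 22, 21])
--     2
--     >>> get_nb_better_result(1, 1, [8, 0])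
--     1
--     >>> get_nb_better_result(2, 8, [29, 20, 8, 18, 18, 21])
--     3
--     '''
--     nb_better_results = 0
--     for score in sorted(scores):
--         if get_best_score(score, surprising=False) >= p:
--             nb_better_results += 1
--         elif S > 0 and get_best_score(score, surprising=True) >= p:
--             nb_better_results += 1
--             S -= 1
--     return nb_better_results
-- ===== SOURCE B (Python) =====
-- def get_best_score(score, surprising=False):
--     # Closed form: best judge score = ceil(t/3) where t = score (+2 if surprising),
--     # or -1 when that would exceed 10.
--     if score == 0:
--         return 0
--     if score == 1:
--         return 1
--     t = score + (2 if surprising else 0)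
--     q = -((-t) // 3)          # ceiling division
--     return -1 if 3 * q > 30 else q
--
-- def get_nb_better_result(S, p, scores):
--     # One pass, no sort: every normal qualifier counts; the surprising-only
--     # qualifiers consume one S each, so min(max(S,0), their count) of them count.
--     normal = 0
--     surprising_only = 0
--     for score in scores:
--         if get_best_score(score, False) >= p:
--             normal += 1
--         elif get_best_score(score, True) >= p:
--             surprising_only += 1
--     return normal + min(max(S, 0), surprising_only)
-- ===== Notes on version B (the rewrite author's own statement) =====
-- stated objective: faster
-- what changed: B drops the sort and the per-element greedy budget: one unsorted pass counts normal qualifiers and surprising-only qualifiers, returning normal + min(max(S,0), surprising_only); the helper's search loop is replaced by a closed-form ceiling division.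
import Mathlib
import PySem

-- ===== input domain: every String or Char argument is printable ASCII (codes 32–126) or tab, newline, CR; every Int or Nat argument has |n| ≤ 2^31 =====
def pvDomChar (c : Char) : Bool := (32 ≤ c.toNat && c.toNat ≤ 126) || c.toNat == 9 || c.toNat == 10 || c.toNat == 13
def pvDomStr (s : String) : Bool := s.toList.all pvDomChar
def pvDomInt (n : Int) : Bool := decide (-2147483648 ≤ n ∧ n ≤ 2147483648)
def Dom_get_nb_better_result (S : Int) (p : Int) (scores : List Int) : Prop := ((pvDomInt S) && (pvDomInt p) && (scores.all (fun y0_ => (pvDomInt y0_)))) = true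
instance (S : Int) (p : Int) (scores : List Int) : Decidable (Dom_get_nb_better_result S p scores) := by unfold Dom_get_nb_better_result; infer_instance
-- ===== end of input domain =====

-- B replaces A's sort + greedy budget by a single unsorted counting pass (and the helper's
-- trial loop by closed-form ceiling division): result is identical, cost drops to O(n).

-- ===== PORT A =====
-- helper get_best_score: loop 'for i in range(3)' ported as structural recursion over the range list
def pvGbsLoopA (score offset : Int) : List Int → Int
  | [] => -1                      -- the for-else: return -1
  | i :: rest =>
      if score + offset + i > 30 then -1
      else if PySem.Int.mod (score + offset + i) 3 = 0 then
        PySem.Int.floordiv (score + offset + i) 3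
      else pvGbsLoopA score offset rest

def get_best_score (score : Int) (surprising : Bool) : Int :=
  if score = 0 then 0
  else if score = 1 then 1
  else
    let offset : Int := if surprising then 2 else 0
    pvGbsLoopA score offset (PySem.List.pyRange 0 3 1)

-- loop body of A's main loop: state (nb_better_results, S)
def pvStepA (p : Int) (st : Int × Int) (score : Int) : Int × Int :=
  if get_best_score score false ≥ p then (st.1 + 1, st.2)
  else if st.2 > 0 ∧ get_best_score score true ≥ p then (st.1 + 1, st.2 - 1)
  else st

def get_nb_better_result (S : Int) (p : Int) (scores : List Int) : Int :=
  ((PySem.List.sorted scores (fun x => x) false).foldl (pvStepA p) (0, S)).1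

-- ===== PORT B =====
def get_best_score_alt (score : Int) (surprising : Bool) : Int :=
  if score = 0 then 0
  else if score = 1 then 1
  else
    let t : Int := score + (if surprising then 2 else 0)
    let q : Int := -(PySem.Int.floordiv (-t) 3)   -- ceiling division
    if 3 * q > 30 then -1 else q

-- loop body of B's single pass: state (normal, surprising_only)
def pvStepB (p : Int) (st : Int × Int) (score : Int) : Int × Int :=
  if get_best_score_alt score false ≥ p then (st.1 + 1, st.2)
  else if get_best_score_alt score true ≥ p then (st.1, st.2 + 1)
  else st

def get_nb_better_result_alt (S : Int) (p : Int) (scores : List Int) : Int :=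
  let st := scores.foldl (pvStepB p) (0, 0)
  st.1 + min (max S 0) st.2

-- ===== PRECONDITION & SPEC =====
def Spec_get_nb_better_result (S : Int) (p : Int) (scores : List Int) (out : Int) : Prop := out = get_nb_better_result_alt S p scores
instance (S : Int) (p : Int) (scores : List Int) (out : Int) : Decidable (Spec_get_nb_better_result S p scores out) := by unfold Spec_get_nb_better_result; infer_instance

-- ===== CLAIM (what is proved, stated in full; the proofs are below) =====
def Claim_equal_get_nb_better_result : Prop := ∀ (S : Int) (p : Int) (scores : List Int), Dom_get_nb_better_result S p scores → Spec_get_nb_better_result S p scores (get_nb_better_result S p scores)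

-- ===== LEMMAS AND PROOFS =====

-- the two helpers agree on every input
theorem pv_gbs_eq (s : Int) (b : Bool) : get_best_score s b = get_best_score_alt s b := by
  have h3 : PySem.List.pyRange 0 3 1 = [0, 1, 2] := by decide
  unfold get_best_score get_best_score_alt
  rw [h3]
  simp only [pvGbsLoopA, PySem.Int.mod_eq_emod_of_pos (by omega : (0:Int) < 3),
    PySem.Int.floordiv_eq_ediv_of_pos (by omega : (0:Int) < 3)]
  cases b <;> split_ifs <;> omega

-- B's fold shifts linearly with its start state
theorem pv_stepB_shift (p : Int) (l : List Int) (n c : Int) :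
    l.foldl (pvStepB p) (n, c)
      = (n + (l.foldl (pvStepB p) (0, 0)).1, c + (l.foldl (pvStepB p) (0, 0)).2) := by
  induction l generalizing n c with
  | nil => simp
  | cons a l ih =>
    simp only [List.foldl_cons]
    by_cases h1 : get_best_score_alt a false ≥ p
    · simp only [pvStepB, if_pos h1]
      rw [ih (n + 1) c, ih (0 + 1) 0]
      simp [Prod.ext_iff]; omega
    · by_cases h2 : get_best_score_alt a true ≥ p
      · simp only [pvStepB, if_neg h1, if_pos h2]
        rw [ih n (c + 1), ih 0 (0 + 1)]
        simp [Prod.ext_iff]; omega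
      · simp only [pvStepB, if_neg h1, if_neg h2]
        exact ih n c

-- B's fold computes the two counts
theorem pv_countB (p : Int) (l : List Int) :
    l.foldl (pvStepB p) (0, 0)
      = ((l.countP (fun s => decide (get_best_score_alt s false ≥ p)) : Int),
         (l.countP (fun s => !decide (get_best_score_alt s false ≥ p)
                             && decide (get_best_score_alt s true ≥ p)) : Int)) := by
  induction l with
  | nil => simp
  | cons a l ih =>
    simp only [List.foldl_cons, List.countP_cons]
    by_cases h1 : get_best_score_alt a false ≥ p
    · simp only [pvStepB, if_pos h1]
      rw [pv_stepB_shift, ih]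
      simp [h1, Prod.ext_iff]; omega
    · by_cases h2 : get_best_score_alt a true ≥ p
      · simp only [pvStepB, if_neg h1, if_pos h2]
        rw [pv_stepB_shift, ih]
        simp [h1, h2, Prod.ext_iff]; omega
      · simp only [pvStepB, if_neg h1, if_neg h2]
        rw [ih]
        simp [h1, h2]

-- A's greedy loop equals "normal count + min(max(S,0), surprising-only count)"
theorem pv_loopA (p : Int) (l : List Int) (nb S : Int) :
    (l.foldl (pvStepA p) (nb, S)).1
      = nb + (l.foldl (pvStepB p) (0, 0)).1
           + min (max S 0) (l.foldl (pvStepB p) (0, 0)).2 := by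
  induction l generalizing nb S with
  | nil => simp
  | cons a l ih =>
    have hc : 0 ≤ (l.foldl (pvStepB p) (0, 0)).2 := by
      rw [pv_countB]; exact Int.natCast_nonneg _
    simp only [List.foldl_cons]
    by_cases h1 : get_best_score a false ≥ p
    · have h1' : get_best_score_alt a false ≥ p := pv_gbs_eq a false ▸ h1
      simp only [pvStepA, if_pos h1, pvStepB, if_pos h1']
      rw [ih, pv_stepB_shift p l (0 + 1) 0]
      simp; omega
    · have h1' : ¬ get_best_score_alt a false ≥ p := pv_gbs_eq a false ▸ h1
      by_cases h2 : get_best_score a true ≥ p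
      · have h2' : get_best_score_alt a true ≥ p := pv_gbs_eq a true ▸ h2
        simp only [pvStepB, if_neg h1', if_pos h2']
        by_cases hS : S > 0
        · simp only [pvStepA, if_neg h1, if_pos (And.intro hS h2)]
          rw [ih, pv_stepB_shift p l 0 (0 + 1)]
          simp; omega
        · have : ¬ (S > 0 ∧ get_best_score a true ≥ p) := fun h => hS h.1
          simp only [pvStepA, if_neg h1, if_neg this]
          rw [ih, pv_stepB_shift p l 0 (0 + 1)]
          simp; omega
      · have h2' : ¬ get_best_score_alt a true ≥ p := pv_gbs_eq a true ▸ h2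
        have : ¬ (S > 0 ∧ get_best_score a true ≥ p) := fun h => h2 h.2
        simp only [pvStepA, if_neg h1, if_neg this, pvStepB, if_neg h1', if_neg h2']
        exact ih nb S

-- ===== VERDICT (by name: the statement is the Claim_ definition above) =====
theorem get_nb_better_result_spec : Claim_equal_get_nb_better_result := by
  intro S p scores _
  unfold Spec_get_nb_better_result get_nb_better_result get_nb_better_result_alt
  rw [pv_loopA, pv_countB, pv_countB,
    (PySem.List.sorted_perm scores (fun x => x) false).countP_eq,
    (PySem.List.sorted_perm scores (fun x => x) false).countP_eq]
  dsimp only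
  omega
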